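-- pv_equiv track=rewrite | github.com/gyorilab/emmaa | emmaa_service/api.py | _sort_pass_fail
-- ===== SOURCE A (Python) =====
-- def _sort_pass_fail(row):
--     def _translator(status):
--         if status.lower() == 'pass':
--             return 0
--         elif status.lower() == 'fail':
--             return 1
--         elif status.lower() == 'n_a':
--             return 2
--         else:
--             raise ValueError(f'Status {status} not handled in sorting test '
--                              f'table')
--     # First sort on count of passing tests per row, then model type from
--     # left (lower number ranks higher).
--     return tuple([sum(row[n+1][1].lower() != 'pass'
--                       for n in range(len(row)-1)),
--                   *(_translator(row[n+1][1]) for n in range(len(row)-1))])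
-- ===== SOURCE B (Python) =====
-- def _sort_pass_fail(row):
--     table = {'pass': 0, 'fail': 1, 'n_a': 2}
--
--     def build(cells):
--         if not cells:
--             return 0, []
--         code = table.get(cells[0][1].lower())
--         if code is None:
--             raise ValueError(f'Status {cells[0][1]} not handled in sorting test '
--                              f'table')
--         count, codes = build(cells[1:])
--         return count + (1 if code else 0), [code] + codes
--
--     count, codes = build(row[1:])
--     return (count, *codes)
-- ===== Notes on version B (the rewrite author's own statement) =====
-- stated objective: alternative
-- what changed: B replaces A's two independent index-driven generator passes (a string-comparison sum plus an if/elif translator pass) with one structural recursion over row[1:] that looks codes up in a dict table and threads the (count, codes) pair back up the recursion, deriving the count from code truthiness.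
import Mathlib
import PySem

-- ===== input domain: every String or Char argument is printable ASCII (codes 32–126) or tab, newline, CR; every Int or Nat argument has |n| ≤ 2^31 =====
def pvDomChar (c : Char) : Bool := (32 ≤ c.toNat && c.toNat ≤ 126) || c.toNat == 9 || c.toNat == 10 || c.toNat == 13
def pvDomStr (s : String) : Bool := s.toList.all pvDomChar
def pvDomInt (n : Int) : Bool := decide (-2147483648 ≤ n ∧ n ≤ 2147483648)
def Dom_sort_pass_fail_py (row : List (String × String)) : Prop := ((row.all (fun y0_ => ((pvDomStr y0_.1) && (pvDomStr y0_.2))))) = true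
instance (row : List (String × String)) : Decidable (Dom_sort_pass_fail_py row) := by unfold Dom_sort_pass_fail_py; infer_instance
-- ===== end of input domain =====

-- B replaces A's two index-driven generator passes by one structural recursion over row[1:]
-- with a dict code table, threading (count, codes) back up; equivalence is on the RETURN value.

-- ===== PORT A =====
-- A's inner _translator; 'none' marks Python's ValueError (excluded by Pre_).
def translatorA (status : String) : Option Int :=
  if PySem.Str.lower status == "pass" then some 0
  else if PySem.Str.lower status == "fail" then some 1
  else if PySem.Str.lower status == "n_a" then some 2
  else none

def sort_pass_fail_py (row : List (String × String)) : List Int :=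
  -- sum(row[n+1][1].lower() != 'pass' for n in range(len(row)-1)) ; index n+1 is always in range
  let count : Int :=
    ((PySem.List.pyRange 0 ((row.length : Int) - 1) 1).map
      (fun n => if PySem.Str.lower (PySem.List.pyGetD row (n + 1) ("", "")).2 ≠ "pass"
                then (1 : Int) else 0)).sum
  count ::
    (PySem.List.pyRange 0 ((row.length : Int) - 1) 1).map
      (fun n => (translatorA (PySem.List.pyGetD row (n + 1) ("", "")).2).getD 0)

-- ===== PORT B =====
-- B's dict table {'pass': 0, 'fail': 1, 'n_a': 2}
def tableB : PySem.Dict String Int :=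
  PySem.Dict.ofList [("pass", 0), ("fail", 1), ("n_a", 2)]

-- B's recursive 'build'; a failed table lookup is Python's ValueError (excluded by Pre_),
-- ported as getD 0 after the get?.
def buildB : List (String × String) → Int × List Int
  | [] => (0, [])
  | c :: rest =>
    let code := (PySem.Dict.get? tableB (PySem.Str.lower c.2)).getD 0
    let r := buildB rest
    (r.1 + (if code ≠ 0 then 1 else 0), code :: r.2)

def sort_pass_fail_py_alt (row : List (String × String)) : List Int :=
  let r := buildB (PySem.List.slice row (some 1) none)
  r.1 :: r.2

-- ===== PRECONDITION & SPEC =====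
-- Pre_ excludes rows with an unrecognized status in row[1:], on which A (and B) raise ValueError.
def Pre_sort_pass_fail_py (row : List (String × String)) : Prop :=
  ((row.drop 1).all (fun c =>
    PySem.Str.lower c.2 == "pass" || PySem.Str.lower c.2 == "fail" ||
    PySem.Str.lower c.2 == "n_a")) = true
instance (row : List (String × String)) : Decidable (Pre_sort_pass_fail_py row) := by
  unfold Pre_sort_pass_fail_py; infer_instance

def pvWitness_sort_pass_fail_py : (List (String × String)) :=
  [("model", "type"), ("t1", "Pass"), ("t2", "FAIL"), ("t3", "n_a")]

def Spec_sort_pass_fail_py (row : List (String × String)) (out : List Int) : Prop := out = sort_pass_fail_py_alt row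
instance (row : List (String × String)) (out : List Int) : Decidable (Spec_sort_pass_fail_py row out) := by unfold Spec_sort_pass_fail_py; infer_instance

-- ===== CLAIM (what is proved, stated in full; the proofs are below) =====
def Claim_equal_sort_pass_fail_py : Prop := ∀ (row : List (String × String)), Dom_sort_pass_fail_py row → Pre_sort_pass_fail_py row → Spec_sort_pass_fail_py row (sort_pass_fail_py row)

-- ===== LEMMAS AND PROOFS =====

-- A's index loop 'f(row[n+1]) for n in range(len(row)-1)' over row = x :: xs is a map over xs.
theorem mapRangeIdx (x : String × String) (xs : List (String × String))
    (f : (String × String) → Int) :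
    (PySem.List.pyRange 0 ((xs.length : Int)) 1).map
      (fun n => f (PySem.List.pyGetD (x :: xs) (n + 1) ("", ""))) = xs.map f := by
  rw [PySem.List.pyRange_one]
  simp only [List.map_map]
  apply List.ext_getElem
  · simp
  · intro i h1 h2
    simp only [List.getElem_map, List.getElem_range, Function.comp]
    have hc : (0 : Int) + (i : Int) + 1 = ((i + 1 : Nat) : Int) := by push_cast; ring
    rw [hc, PySem.List.pyGetD_natCast]
    simp only [List.getD_cons_succ]
    simp at h2
    rw [List.getD_eq_getElem _ _ h2]

-- B's recursion computes A's two passes, given every status is in the table.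
theorem buildB_eq (xs : List (String × String))
    (hpre : (xs.all (fun c =>
      PySem.Str.lower c.2 == "pass" || PySem.Str.lower c.2 == "fail" ||
      PySem.Str.lower c.2 == "n_a")) = true) :
    buildB xs =
      ((xs.map (fun c => if PySem.Str.lower c.2 ≠ "pass" then (1 : Int) else 0)).sum,
       xs.map (fun c => (translatorA c.2).getD 0)) := by
  induction xs with
  | nil => rfl
  | cons c rest ih =>
    simp only [List.all_cons, Bool.and_eq_true] at hpre
    obtain ⟨hc, hrest⟩ := hpre
    simp only [buildB, ih hrest, List.map_cons, List.sum_cons]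
    rcases Bool.or_eq_true_iff.mp hc with h | h
    · rcases Bool.or_eq_true_iff.mp h with h' | h'
      · have hl : PySem.Str.lower c.2 = "pass" := by simpa using h'
        have hp : PySem.Dict.get? tableB "pass" = some 0 := by rfl
        simp [translatorA, hl, hp]
      · have hl : PySem.Str.lower c.2 = "fail" := by simpa using h'
        have hp : PySem.Dict.get? tableB "fail" = some 1 := by rfl
        simp [translatorA, hl, hp]
        ring
    · have hl : PySem.Str.lower c.2 = "n_a" := by simpa using h
      have hp : PySem.Dict.get? tableB "n_a" = some 2 := by rfl
      simp [translatorA, hl, hp]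
      ring

-- ===== VERDICT (by name: the statement is the Claim_ definition above) =====
theorem sort_pass_fail_py_spec : Claim_equal_sort_pass_fail_py := by
  intro row _hdom hpre
  unfold Spec_sort_pass_fail_py sort_pass_fail_py sort_pass_fail_py_alt
  cases row with
  | nil => simp [PySem.List.pyRange, PySem.List.slice, buildB]
  | cons x xs =>
    rw [PySem.List.slice_from_one]
    have hlen : ((x :: xs).length : Int) - 1 = (xs.length : Int) := by simp
    unfold Pre_sort_pass_fail_py at hpre
    simp only [List.drop_one, List.tail_cons] at hpre
    rw [hlen,
      mapRangeIdx x xs (fun c => if PySem.Str.lower c.2 ≠ "pass" then (1 : Int) else 0),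
      mapRangeIdx x xs (fun c => (translatorA c.2).getD 0)]
    simp [List.tail_cons, buildB_eq xs hpre]
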